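-- pv_equiv track=rewrite | github.com/zcTresure/LeetCode_Python | questions/1-1000/700-799/778. 水位上升的泳池中游泳.py | check
-- ===== SOURCE A (Python) =====
-- from collections import deque
--
-- def check(grid: list, thread: int):
--     if grid[0][0] > thread:
--         return False
--     n = len(grid)
--     visited = [[0] * n for _ in range(n)]
--     visited[0][0] = 1
--     q = deque([(0, 0)])
--     while q:
--         x, y = q.popleft()
--         for nx, ny in [(x + 1, y), (x - 1, y), (x, y + 1), (x, y - 1)]:
--             if 0 <= nx < n and 0 <= ny < n and visited[nx][ny] == 0 and grid[nx][ny] <= thread: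
--                 q.append((nx, ny))
--                 visited[nx][ny] = 1
--     return visited[n - 1][n - 1] == 1
-- ===== SOURCE B (Python) =====
-- def check(grid: list, thread: int):
--     n = len(grid)
--     if grid[0][0] > thread:
--         return False
--     marked = {(0, 0)}
--     changed = True
--     while changed:
--         changed = False
--         for i in range(n):
--             for j in range(n):
--                 if (i, j) not in marked and grid[i][j] <= thread and (
--                     (i - 1, j) in marked or (i + 1, j) in marked
--                     or (i, j - 1) in marked or (i, j + 1) in marked
--                 ):
--                     marked.add((i, j))
--                     changed = True
--     return (n - 1, n - 1) in marked
-- ===== Notes on version B (the rewrite author's own statement) =====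
-- stated objective: alternative
-- what changed: Replaced A's deque-based BFS flood fill (visited matrix + FIFO queue) by a queue-free fixed-point relaxation: repeated whole-grid passes that mark any threshold-ok cell adjacent to an already-marked cell until a pass changes nothing.
-- outside the precondition, e.g. on check([[0, 164], [0, 164], [0, 164], [0, 164]], 8): A returns False, B raises IndexError
import Mathlib
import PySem

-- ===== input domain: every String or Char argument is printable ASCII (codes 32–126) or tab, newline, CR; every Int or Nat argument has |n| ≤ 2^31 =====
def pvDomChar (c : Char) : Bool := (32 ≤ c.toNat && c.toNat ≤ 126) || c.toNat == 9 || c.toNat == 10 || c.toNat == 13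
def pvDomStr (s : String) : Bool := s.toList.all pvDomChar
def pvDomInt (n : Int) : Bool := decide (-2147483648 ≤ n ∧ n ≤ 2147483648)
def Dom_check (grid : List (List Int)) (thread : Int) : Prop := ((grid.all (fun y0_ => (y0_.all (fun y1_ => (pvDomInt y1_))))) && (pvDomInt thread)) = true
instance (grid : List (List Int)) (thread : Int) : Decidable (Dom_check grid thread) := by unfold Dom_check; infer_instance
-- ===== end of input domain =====

-- B replaces A's deque-based BFS by a queue-free fixed-point relaxation: repeated whole-grid
-- passes that mark any threshold-ok cell adjacent to a marked cell, until a pass changes nothing.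
-- Objective: alternative (a genuinely different saturation strategy, similar cost on small grids).

-- ===== PORT A =====
-- grid[x][y] (both indices known in range under Pre_, so the defaults are never used)
def gget (grid : List (List Int)) (x y : Int) : Int :=
  PySem.List.pyGetD (PySem.List.pyGetD grid x []) y 0

-- visited[x][y]
def vget (v : List (List Int)) (x y : Int) : Int :=
  PySem.List.pyGetD (PySem.List.pyGetD v x []) y 0

-- visited[x][y] = a
def vset (v : List (List Int)) (x y a : Int) : List (List Int) :=
  PySem.List.pySetD v x (PySem.List.pySetD (PySem.List.pyGetD v x []) y a)

-- body of A's inner `for nx, ny in [...]` loop: state is (visited, queue)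
def bfsStep (grid : List (List Int)) (thread n : Int)
    (st : List (List Int) × List (Int × Int)) (p : Int × Int) :
    List (List Int) × List (Int × Int) :=
  if 0 ≤ p.1 ∧ p.1 < n ∧ 0 ≤ p.2 ∧ p.2 < n ∧ vget st.1 p.1 p.2 = 0 ∧ gget grid p.1 p.2 ≤ thread
  then (vset st.1 p.1 p.2 1, st.2 ++ [p])
  else st

-- A's `while q:` loop (fuel is only a totality guard; it is proved sufficient below)
def bfsLoop (grid : List (List Int)) (thread n : Int) :
    Nat → List (List Int) → List (Int × Int) → List (List Int)
  | 0, v, _ => v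
  | _ + 1, v, [] => v
  | fuel + 1, v, (x, y) :: rest =>
      let st := [(x + 1, y), (x - 1, y), (x, y + 1), (x, y - 1)].foldl
        (bfsStep grid thread n) (v, rest)
      bfsLoop grid thread n fuel st.1 st.2

def check (grid : List (List Int)) (thread : Int) : Bool :=
  if gget grid 0 0 > thread then false
  else
    let n : Int := grid.length
    let visited := (PySem.List.pyRange 0 n 1).map (fun _ => List.replicate grid.length (0 : Int))
    let visited := vset visited 0 0 1
    let final := bfsLoop grid thread n (grid.length * grid.length + 1) visited [(0, 0)]
    vget final (n - 1) (n - 1) == 1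

-- ===== PORT B =====
-- body of B's innermost conditional: state is (marked, changed)
def passCell (grid : List (List Int)) (thread : Int)
    (st : PySem.Set (Int × Int) × Bool) (i j : Int) : PySem.Set (Int × Int) × Bool :=
  if (i, j) ∉ st.1 ∧ gget grid i j ≤ thread ∧
      ((i - 1, j) ∈ st.1 ∨ (i + 1, j) ∈ st.1 ∨ (i, j - 1) ∈ st.1 ∨ (i, j + 1) ∈ st.1)
  then (PySem.Set.add st.1 (i, j), true)
  else st

-- one full pass over the grid (the two nested `for` loops)
def bPass (grid : List (List Int)) (thread n : Int)
    (st : PySem.Set (Int × Int) × Bool) : PySem.Set (Int × Int) × Bool :=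
  (PySem.List.pyRange 0 n 1).foldl
    (fun st i => (PySem.List.pyRange 0 n 1).foldl (fun st j => passCell grid thread st i j) st) st

-- B's `while changed:` loop (fuel is only a totality guard; it is proved sufficient below)
def bLoop (grid : List (List Int)) (thread n : Int) :
    Nat → PySem.Set (Int × Int) → PySem.Set (Int × Int)
  | 0, m => m
  | fuel + 1, m =>
      let st := bPass grid thread n (m, false)
      if st.2 then bLoop grid thread n fuel st.1 else st.1

def check_alt (grid : List (List Int)) (thread : Int) : Bool :=
  let n : Int := grid.length
  if gget grid 0 0 > thread then false
  else
    let final := bLoop grid thread n (grid.length * grid.length + 1)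
      (PySem.Set.ofList [((0 : Int), (0 : Int))])
    PySem.Set.contains final (n - 1, n - 1)

-- ===== PRECONDITION & SPEC =====
-- Pre_ excludes the empty grid and an empty first row (A raises IndexError on grid[0][0]) and
-- ragged grids with a row shorter than len(grid) that skip the early threshold exit: there A's
-- BFS may or may not index past a short row depending on which cells it reaches, while B's
-- whole-grid scan always reads every cell and raises IndexError.
def Pre_check (grid : List (List Int)) (thread : Int) : Prop :=
  grid ≠ [] ∧ grid.getD 0 [] ≠ [] ∧
  (thread < (grid.getD 0 []).getD 0 0 ∨ ∀ row ∈ grid, grid.length ≤ row.length)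
instance (grid : List (List Int)) (thread : Int) : Decidable (Pre_check grid thread) := by
  unfold Pre_check; infer_instance

def pvWitness_check : List (List Int) × Int := ([[0, 2], [3, 1]], 2)

def Spec_check (grid : List (List Int)) (thread : Int) (out : Bool) : Prop := out = check_alt grid thread
instance (grid : List (List Int)) (thread : Int) (out : Bool) : Decidable (Spec_check grid thread out) := by unfold Spec_check; infer_instance

-- ===== CLAIM (what is proved, stated in full; the proofs are below) =====
def Claim_equal_check : Prop := ∀ (grid : List (List Int)) (thread : Int), Dom_check grid thread → Pre_check grid thread → Spec_check grid thread (check grid thread)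

-- ===== LEMMAS AND PROOFS =====

-- the common reachability specification
def InR (n : Int) (p : Int × Int) : Prop := 0 ≤ p.1 ∧ p.1 < n ∧ 0 ≤ p.2 ∧ p.2 < n

def Good (grid : List (List Int)) (thread : Int) (p : Int × Int) : Prop :=
  InR (grid.length : Int) p ∧ gget grid p.1 p.2 ≤ thread

def Adj (p q : Int × Int) : Prop :=
  q = (p.1 + 1, p.2) ∨ q = (p.1 - 1, p.2) ∨ q = (p.1, p.2 + 1) ∨ q = (p.1, p.2 - 1)

inductive Reach (grid : List (List Int)) (thread : Int) : Int × Int → Prop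
  | seed : Good grid thread (0, 0) → Reach grid thread (0, 0)
  | step {p q : Int × Int} : Reach grid thread p → Adj p q → Good grid thread q →
      Reach grid thread q

lemma reach_good {grid : List (List Int)} {thread : Int} {p : Int × Int}
    (h : Reach grid thread p) : Good grid thread p := by
  cases h with
  | seed h => exact h
  | step _ _ h => exact h

-- any seed-containing, Adj-closed predicate contains every reachable cell
lemma reach_of_closed {grid : List (List Int)} {thread : Int} (M : Int × Int → Prop)
    (hseed : M (0, 0))
    (hclosed : ∀ p, Good grid thread p → M p → ∀ q, Adj p q → Good grid thread q → M q) :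
    ∀ p, Reach grid thread p → M p := by
  intro p h
  induction h with
  | seed _ => exact hseed
  | step h hadj hgood ih => exact hclosed _ (reach_good h) ih _ hadj hgood

-- ---------- Nat-indexed view of the visited matrix ----------
def mget (v : List (List Int)) (i j : Nat) : Int := (v.getD i []).getD j 0
def mset (v : List (List Int)) (i j : Nat) (a : Int) : List (List Int) :=
  v.set i ((v.getD i []).set j a)

def ShapeN (n : Nat) (v : List (List Int)) : Prop := v.length = n ∧ ∀ r ∈ v, r.length = n
def BinV (v : List (List Int)) : Prop := ∀ r ∈ v, ∀ x ∈ r, x = 0 ∨ x = 1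
def zeros (v : List (List Int)) : Nat := (v.map (fun r => r.count 0)).sum

lemma vget_nat (v : List (List Int)) (x y : Int) (hx : 0 ≤ x) (hy : 0 ≤ y) :
    vget v x y = mget v x.toNat y.toNat := by
  obtain ⟨i, rfl⟩ : ∃ i : Nat, x = (i : Int) := ⟨x.toNat, by omega⟩
  obtain ⟨j, rfl⟩ : ∃ j : Nat, y = (j : Int) := ⟨y.toNat, by omega⟩
  simp [vget, mget, PySem.List.pyGetD_natCast]

lemma vset_nat (v : List (List Int)) (x y a : Int) (hx : 0 ≤ x) (hy : 0 ≤ y) :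
    vset v x y a = mset v x.toNat y.toNat a := by
  obtain ⟨i, rfl⟩ : ∃ i : Nat, x = (i : Int) := ⟨x.toNat, by omega⟩
  obtain ⟨j, rfl⟩ : ∃ j : Nat, y = (j : Int) := ⟨y.toNat, by omega⟩
  simp [vset, mset, PySem.List.pyGetD_natCast, PySem.List.pySetD_natCast]

lemma getD_eq_get {α : Type} (l : List α) (i : Nat) (d : α) (h : i < l.length) :
    l.getD i d = l[i] := by
  rw [List.getD_eq_getElem?_getD, List.getElem?_eq_getElem h]; rfl

lemma getD_mem {α : Type} (l : List α) (i : Nat) (d : α) (h : i < l.length) :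
    l.getD i d ∈ l := by
  rw [getD_eq_get _ _ _ h]
  exact List.getElem_mem h

lemma getD_out {α : Type} (l : List α) (i : Nat) (d : α) (h : ¬ i < l.length) :
    l.getD i d = d := by
  rw [List.getD_eq_getElem?_getD, List.getElem?_eq_none (by omega)]; rfl

lemma shapeN_mset {n : Nat} {v : List (List Int)} (hsh : ShapeN n v) {i : Nat} (hi : i < v.length) (j : Nat) (a : Int) :
    ShapeN n (mset v i j a) := by
  obtain ⟨hlen, hrows⟩ := hsh
  refine ⟨by simp [mset, hlen], ?_⟩
  intro r hr
  rcases List.mem_or_eq_of_mem_set hr with h | h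
  · exact hrows r h
  · subst h
    rw [List.length_set]
    exact hrows _ (getD_mem _ _ _ hi)

lemma binV_mset {v : List (List Int)} (hb : BinV v) (i j : Nat) :
    BinV (mset v i j 1) := by
  intro r hr x hx
  rcases List.mem_or_eq_of_mem_set hr with h | h
  · exact hb r h x hx
  · subst h
    rcases List.mem_or_eq_of_mem_set hx with h' | h'
    · by_cases hi : i < v.length
      · exact hb _ (getD_mem _ _ _ hi) x h'
      · rw [getD_out _ _ _ (by omega)] at h'
        simp at h'
    · right; exact h'

lemma getD_set_self {α : Type} (l : List α) (i : Nat) (a d : α) (h : i < l.length) :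
    (l.set i a).getD i d = a := by
  rw [List.getD_eq_getElem?_getD, List.getElem?_set_self h]; rfl

lemma getD_set_ne {α : Type} (l : List α) (i k : Nat) (a d : α) (h : ¬ i = k) :
    (l.set i a).getD k d = l.getD k d := by
  rw [List.getD_eq_getElem?_getD, List.getElem?_set_ne h, ← List.getD_eq_getElem?_getD]

lemma mget_mset_self {v : List (List Int)} {i j : Nat} (hi : i < v.length)
    (hj : j < (v.getD i []).length) (a : Int) : mget (mset v i j a) i j = a := by
  simp only [mget, mset]
  rw [getD_set_self _ _ _ _ hi, getD_set_self _ _ _ _ hj]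

lemma mget_mset_ne {v : List (List Int)} (i j i' j' : Nat) (a : Int)
    (h : ¬(i' = i ∧ j' = j)) : mget (mset v i j a) i' j' = mget v i' j' := by
  simp only [mget, mset]
  by_cases hii : i' = i
  · subst hii
    have hj : ¬ j' = j := by tauto
    by_cases hi : i' < v.length
    · rw [getD_set_self _ _ _ _ hi, getD_set_ne _ _ _ _ _ (by omega)]
    · rw [List.set_eq_of_length_le (by omega)]
  · rw [getD_set_ne _ _ _ _ _ (by omega)]

lemma mget_bin {v : List (List Int)} (hb : BinV v)
    (i j : Nat) : mget v i j = 0 ∨ mget v i j = 1 := by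
  simp only [mget]
  by_cases hi : i < v.length
  · by_cases hj : j < (v.getD i []).length
    · exact hb _ (getD_mem _ _ _ hi) _ (getD_mem _ _ _ hj)
    · left
      exact getD_out (v.getD i []) _ _ (by omega)
  · left
    rw [getD_out v _ _ (by omega)]
    rfl

lemma sum_set_nat (l : List Nat) (i : Nat) (b : Nat) (h : i < l.length) :
    (l.set i b).sum + l[i] = l.sum + b := by
  induction l generalizing i with
  | nil => simp at h
  | cons x t ih =>
    cases i with
    | zero => simp [List.set]; omega
    | succ k =>
      have hk : k < t.length := by simpa using h
      have := ih k hk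
      simp [List.set, List.sum_cons]
      omega

lemma count_set_zero (row : List Int) (j : Nat) (hj : j < row.length)
    (h0 : row.getD j 0 = 0) : (row.set j 1).count 0 + 1 = row.count 0 := by
  induction row generalizing j with
  | nil => simp at hj
  | cons x t ih =>
    cases j with
    | zero =>
      simp only [List.getD_eq_getElem?_getD] at h0
      simp at h0
      simp [List.set, h0]
    | succ k =>
      have hk : k < t.length := by simpa using hj
      have h0' : t.getD k 0 = 0 := by
        simpa [List.getD_eq_getElem?_getD] using h0
      have := ih k hk h0'
      simp [List.set, List.count_cons]
      omega

lemma zeros_mset {v : List (List Int)} {i j : Nat} (hi : i < v.length)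
    (hj : j < (v.getD i []).length) (h0 : mget v i j = 0) :
    zeros (mset v i j 1) + 1 = zeros v := by
  simp only [zeros, mset, List.map_set]
  have hmap : i < (v.map (fun r => r.count 0)).length := by simpa using hi
  have hs := sum_set_nat (v.map (fun r => r.count 0)) i (((v.getD i []).set j 1).count 0) hmap
  have hgd : (v.map (fun r => r.count 0))[i] = (v.getD i []).count 0 := by
    rw [List.getElem_map]
    congr 1
    rw [getD_eq_get _ _ _ hi]
  have hc := count_set_zero (v.getD i []) j hj (by simpa [mget] using h0)
  omega

-- ---------- A side: the BFS loop ----------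
def MarkedA (v : List (List Int)) (p : Int × Int) : Prop := vget v p.1 p.2 = 1

-- effect of A's inner 4-neighbour fold on the state
lemma foldA (grid : List (List Int)) (thread : Int) (L : List (Int × Int))
    (v : List (List Int)) (q : List (Int × Int))
    (hL : L.Pairwise (· ≠ ·)) (hsh : ShapeN grid.length v) (hbin : BinV v) :
    ShapeN grid.length (L.foldl (bfsStep grid thread (grid.length : Int)) (v, q)).1 ∧
    BinV (L.foldl (bfsStep grid thread (grid.length : Int)) (v, q)).1 ∧
    (∀ p : Int × Int, 0 ≤ p.1 → 0 ≤ p.2 →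
      (MarkedA (L.foldl (bfsStep grid thread (grid.length : Int)) (v, q)).1 p ↔
        MarkedA v p ∨ (p ∈ L ∧ Good grid thread p ∧ ¬ MarkedA v p))) ∧
    (∀ p : Int × Int, p ∈ (L.foldl (bfsStep grid thread (grid.length : Int)) (v, q)).2 ↔
      p ∈ q ∨ (p ∈ L ∧ Good grid thread p ∧ ¬ MarkedA v p)) ∧
    zeros (L.foldl (bfsStep grid thread (grid.length : Int)) (v, q)).1 +
      (L.foldl (bfsStep grid thread (grid.length : Int)) (v, q)).2.length =
      zeros v + q.length := by
  induction L generalizing v q with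
  | nil =>
    refine ⟨hsh, hbin, ?_, ?_, rfl⟩
    · intro p _ _; simp
    · intro p; simp
  | cons c L' ih =>
    have hL' : L'.Pairwise (· ≠ ·) := (List.pairwise_cons.mp hL).2
    have hcL' : ∀ x ∈ L', c ≠ x := (List.pairwise_cons.mp hL).1
    simp only [List.foldl_cons]
    by_cases hc : 0 ≤ c.1 ∧ c.1 < (grid.length : Int) ∧ 0 ≤ c.2 ∧ c.2 < (grid.length : Int) ∧
        vget v c.1 c.2 = 0 ∧ gget grid c.1 c.2 ≤ thread
    · have hstep : bfsStep grid thread (grid.length : Int) (v, q) c =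
          (vset v c.1 c.2 1, q ++ [c]) := by
        simp only [bfsStep]
        rw [if_pos hc]
      rw [hstep]
      obtain ⟨hc1, hc2, hc3, hc4, hc5, hc6⟩ := hc
      have hvn : vset v c.1 c.2 1 = mset v c.1.toNat c.2.toNat 1 := vset_nat v _ _ 1 hc1 hc3
      have hiv : c.1.toNat < v.length := by
        have := hsh.1; omega
      have hrowlen : (v.getD c.1.toNat []).length = grid.length :=
        hsh.2 _ (getD_mem _ _ _ hiv)
      have hjv : c.2.toNat < (v.getD c.1.toNat []).length := by
        rw [hrowlen]; omega
      have hm0 : mget v c.1.toNat c.2.toNat = 0 := by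
        rw [← vget_nat v c.1 c.2 hc1 hc3]; exact hc5
      have hsh1 : ShapeN grid.length (vset v c.1 c.2 1) := by
        rw [hvn]; exact shapeN_mset hsh hiv _ 1
      have hbin1 : BinV (vset v c.1 c.2 1) := by
        rw [hvn]; exact binV_mset hbin _ _
      have hGoodc : Good grid thread c := ⟨⟨hc1, hc2, hc3, hc4⟩, hc6⟩
      have hnotm : ¬ MarkedA v c := by
        simp only [MarkedA, hc5]; omega
      have hmark1 : ∀ p : Int × Int, 0 ≤ p.1 → 0 ≤ p.2 →
          (MarkedA (vset v c.1 c.2 1) p ↔ MarkedA v p ∨ p = c) := by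
        intro p hp1 hp2
        simp only [MarkedA]
        rw [vget_nat _ _ _ hp1 hp2, vget_nat _ _ _ hp1 hp2, hvn]
        by_cases hpc : p = c
        · subst hpc
          rw [mget_mset_self hiv hjv]
          simp
        · rw [mget_mset_ne _ _ _ _ _ (by
            rintro ⟨e1, e2⟩
            exact hpc (Prod.ext (by omega) (by omega)))]
          simp [hpc]
      obtain ⟨ih1, ih2, ih3, ih4, ih5⟩ := ih (vset v c.1 c.2 1) (q ++ [c]) hL' hsh1 hbin1
      clear ih
      have hcnotL' : c ∉ L' := fun h => (hcL' c h) rfl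
      refine ⟨ih1, ih2, ?_, ?_, ?_⟩
      · intro p hp1 hp2
        rw [ih3 p hp1 hp2, hmark1 p hp1 hp2]
        by_cases hpc : p = c
        · subst hpc
          simp only [List.mem_cons]
          tauto
        · simp only [List.mem_cons]
          tauto
      · intro p
        rw [ih4 p]
        by_cases hpc : p = c
        · subst hpc
          simp only [List.mem_append, List.mem_cons]
          tauto
        · have hq : p ∈ q ++ [c] ↔ p ∈ q := by
            simp [List.mem_append, hpc]
          rw [hq]
          simp only [List.mem_cons]
          by_cases hg : Good grid thread p
          · have hp1 : 0 ≤ p.1 := hg.1.1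
            have hp2 : 0 ≤ p.2 := hg.1.2.2.1
            rw [hmark1 p hp1 hp2]
            tauto
          · tauto
      · have hz : zeros (vset v c.1 c.2 1) + 1 = zeros v := by
          rw [hvn]; exact zeros_mset hiv hjv hm0
        rw [ih5]
        simp only [List.length_append, List.length_cons, List.length_nil]
        omega
    · have hstep : bfsStep grid thread (grid.length : Int) (v, q) c = (v, q) := by
        simp only [bfsStep]
        rw [if_neg hc]
      rw [hstep]
      obtain ⟨ih1, ih2, ih3, ih4, ih5⟩ := ih v q hL' hsh hbin
      clear ih
      have hkey : ¬ (Good grid thread c ∧ ¬ MarkedA v c) := by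
        rintro ⟨⟨⟨g1, g2, g3, g4⟩, g5⟩, hnm⟩
        have hb01 := mget_bin hbin c.1.toNat c.2.toNat
        rw [← vget_nat v c.1 c.2 g1 g3] at hb01
        rcases hb01 with h0 | h1
        · exact hc ⟨g1, g2, g3, g4, h0, g5⟩
        · exact hnm h1
      refine ⟨ih1, ih2, ?_, ?_, ih5⟩
      · intro p hp1 hp2
        rw [ih3 p hp1 hp2]
        by_cases hpc : p = c
        · subst hpc
          have : p ∉ L' := fun h => (hcL' p h) rfl
          tauto
        · simp only [List.mem_cons]
          tauto
      · intro p
        rw [ih4 p]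
        by_cases hpc : p = c
        · subst hpc
          have : p ∉ L' := fun h => (hcL' p h) rfl
          tauto
        · simp only [List.mem_cons]
          tauto

def InvA (grid : List (List Int)) (thread : Int) (fuel : Nat) (v : List (List Int))
    (q : List (Int × Int)) : Prop :=
  ShapeN grid.length v ∧ BinV v ∧
  (∀ p : Int × Int, 0 ≤ p.1 → 0 ≤ p.2 → MarkedA v p → Reach grid thread p) ∧
  (∀ p ∈ q, Good grid thread p ∧ MarkedA v p) ∧
  (∀ p : Int × Int, 0 ≤ p.1 → 0 ≤ p.2 → MarkedA v p → p ∉ q →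
    ∀ q' : Int × Int, Adj p q' → Good grid thread q' → MarkedA v q') ∧
  zeros v + q.length ≤ fuel

lemma bfsLoop_correct (grid : List (List Int)) (thread : Int) :
    ∀ (fuel : Nat) (v : List (List Int)) (q : List (Int × Int)),
    InvA grid thread fuel v q →
    (∀ p : Int × Int, 0 ≤ p.1 → 0 ≤ p.2 → MarkedA v p →
        MarkedA (bfsLoop grid thread (grid.length : Int) fuel v q) p) ∧
    (∀ p : Int × Int, 0 ≤ p.1 → 0 ≤ p.2 →
        MarkedA (bfsLoop grid thread (grid.length : Int) fuel v q) p →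
        Reach grid thread p) ∧
    (∀ p : Int × Int, 0 ≤ p.1 → 0 ≤ p.2 →
        MarkedA (bfsLoop grid thread (grid.length : Int) fuel v q) p →
        ∀ q' : Int × Int, Adj p q' → Good grid thread q' →
          MarkedA (bfsLoop grid thread (grid.length : Int) fuel v q) q') := by
  intro fuel
  induction fuel with
  | zero =>
    intro v q hinv
    obtain ⟨hsh, hbin, hsound, hq, hcl, hmeas⟩ := hinv
    have hqnil : q = [] := by
      cases q with
      | nil => rfl
      | cons a t => simp at hmeas
    subst hqnil
    simp only [bfsLoop]
    exact ⟨fun p _ _ h => h, hsound,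
      fun p hp1 hp2 hm q' hadj hg => hcl p hp1 hp2 hm (by simp) q' hadj hg⟩
  | succ fuel ih =>
    intro v q hinv
    obtain ⟨hsh, hbin, hsound, hq, hcl, hmeas⟩ := hinv
    cases q with
    | nil =>
      simp only [bfsLoop]
      exact ⟨fun p _ _ h => h, hsound,
        fun p hp1 hp2 hm q' hadj hg => hcl p hp1 hp2 hm (by simp) q' hadj hg⟩
    | cons hd rest =>
      obtain ⟨x, y⟩ := hd
      have hLpw : ([(x + 1, y), (x - 1, y), (x, y + 1), (x, y - 1)] :
          List (Int × Int)).Pairwise (· ≠ ·) := by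
        simp only [List.pairwise_cons, List.mem_cons, List.not_mem_nil, false_implies,
          implies_true, List.Pairwise.nil, and_true, ne_eq, Prod.ext_iff, not_and]
        refine ⟨?_, ?_, ?_⟩ <;> intro a h e1 e2 <;> obtain ⟨a1, a2⟩ := a <;> simp_all <;> omega
      obtain ⟨f1, f2, f3, f4, f5⟩ :=
        foldA grid thread [(x + 1, y), (x - 1, y), (x, y + 1), (x, y - 1)] v rest hLpw hsh hbin
      obtain ⟨hgoodhd, hmhd⟩ := hq (x, y) (by simp)
      have hx1 : (0 : Int) ≤ x := hgoodhd.1.1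
      have hy1 : (0 : Int) ≤ y := hgoodhd.1.2.2.1
      have hreachhd : Reach grid thread (x, y) := hsound (x, y) hx1 hy1 hmhd
      have hadjL : ∀ p : Int × Int,
          p ∈ ([(x + 1, y), (x - 1, y), (x, y + 1), (x, y - 1)] : List (Int × Int)) ↔
            Adj (x, y) p := by
        intro p
        simp [Adj, List.mem_cons]
      set st := ([(x + 1, y), (x - 1, y), (x, y + 1), (x, y - 1)] :
        List (Int × Int)).foldl (bfsStep grid thread (grid.length : Int)) (v, rest) with hst
      have hmono : ∀ p : Int × Int, 0 ≤ p.1 → 0 ≤ p.2 → MarkedA v p → MarkedA st.1 p := by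
        intro p hp1 hp2 h
        rw [f3 p hp1 hp2]
        exact Or.inl h
      have hinv' : InvA grid thread fuel st.1 st.2 := by
        refine ⟨f1, f2, ?_, ?_, ?_, ?_⟩
        · -- soundness
          intro p hp1 hp2 hm
          rw [f3 p hp1 hp2] at hm
          rcases hm with h | ⟨hpL, hg, _⟩
          · exact hsound p hp1 hp2 h
          · exact Reach.step hreachhd ((hadjL p).mp hpL) hg
        · -- queue members good and marked
          intro p hp
          rw [f4 p] at hp
          rcases hp with h | ⟨hpL, hg, hnm⟩
          · obtain ⟨hg, hm⟩ := hq p (by simp [h])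
            exact ⟨hg, hmono p hg.1.1 hg.1.2.2.1 hm⟩
          · refine ⟨hg, ?_⟩
            rw [f3 p hg.1.1 hg.1.2.2.1]
            exact Or.inr ⟨hpL, hg, hnm⟩
        · -- partial closure
          intro p hp1 hp2 hm hnq q' hadj hg'
          have hq'1 : (0 : Int) ≤ q'.1 := hg'.1.1
          have hq'2 : (0 : Int) ≤ q'.2 := hg'.1.2.2.1
          rw [f3 p hp1 hp2] at hm
          rcases hm with hmv | ⟨hpL, hgp, hnmv⟩
          · by_cases hpc : p = (x, y)
            · subst hpc
              by_cases hmq' : MarkedA v q'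
              · rw [f3 q' hq'1 hq'2]; exact Or.inl hmq'
              · rw [f3 q' hq'1 hq'2]
                exact Or.inr ⟨(hadjL q').mpr hadj, hg', hmq'⟩
            · have hprest : p ∉ rest := by
                intro h
                exact hnq ((f4 p).mpr (Or.inl h))
              have hmvq' := hcl p hp1 hp2 hmv (by simp [hpc, hprest]) q' hadj hg'
              rw [f3 q' hq'1 hq'2]
              exact Or.inl hmvq'
          · exact absurd ((f4 p).mpr (Or.inr ⟨hpL, hgp, hnmv⟩)) hnq
        · -- measure
          have h5 : zeros st.1 + st.2.length = zeros v + rest.length := f5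
          have h6 : (((x, y) : Int × Int) :: rest).length = rest.length + 1 := by simp
          omega
      obtain ⟨m1, m2, m3⟩ := ih st.1 st.2 hinv'
      have hunf : bfsLoop grid thread (grid.length : Int) (fuel + 1) v ((x, y) :: rest) =
          bfsLoop grid thread (grid.length : Int) fuel st.1 st.2 := by
        simp only [bfsLoop]
        rw [← hst]
      rw [hunf]
      exact ⟨fun p hp1 hp2 h => m1 p hp1 hp2 (hmono p hp1 hp2 h), m2, m3⟩

-- ---------- B side: the fixed-point loop ----------
lemma adj_mem_cases {m p : Int × Int} (h : Adj m p) :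
    m = (p.1 - 1, p.2) ∨ m = (p.1 + 1, p.2) ∨ m = (p.1, p.2 - 1) ∨ m = (p.1, p.2 + 1) := by
  obtain ⟨a, b⟩ := m
  obtain ⟨c, d⟩ := p
  simp only [Adj, Prod.mk.injEq] at h ⊢
  rcases h with ⟨h1, h2⟩ | ⟨h1, h2⟩ | ⟨h1, h2⟩ | ⟨h1, h2⟩
  · left; omega
  · right; left; omega
  · right; right; left; omega
  · right; right; right; omega

-- effect of folding passCell over any list of in-range cells
lemma foldB (grid : List (List Int)) (thread : Int) (cells : List (Int × Int))
    (hin : ∀ c ∈ cells, InR (grid.length : Int) c) :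
    ∀ (S : PySem.Set (Int × Int)) (c0 : Bool),
    S.Nodup → (∀ p ∈ S, Reach grid thread p) → (∀ p ∈ S, InR (grid.length : Int) p) →
    (∀ p ∈ S, p ∈ (cells.foldl (fun st c => passCell grid thread st c.1 c.2) (S, c0)).1) ∧
    (cells.foldl (fun st c => passCell grid thread st c.1 c.2) (S, c0)).1.Nodup ∧
    (∀ p ∈ (cells.foldl (fun st c => passCell grid thread st c.1 c.2) (S, c0)).1,
        Reach grid thread p) ∧
    (∀ p ∈ (cells.foldl (fun st c => passCell grid thread st c.1 c.2) (S, c0)).1,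
        InR (grid.length : Int) p) ∧
    S.length ≤ (cells.foldl (fun st c => passCell grid thread st c.1 c.2) (S, c0)).1.length ∧
    ((cells.foldl (fun st c => passCell grid thread st c.1 c.2) (S, c0)).2 = true →
      c0 = true ∨
        S.length < (cells.foldl (fun st c => passCell grid thread st c.1 c.2) (S, c0)).1.length) ∧
    (c0 = true → (cells.foldl (fun st c => passCell grid thread st c.1 c.2) (S, c0)).2 = true) ∧
    ((cells.foldl (fun st c => passCell grid thread st c.1 c.2) (S, c0)).2 = false →
      (cells.foldl (fun st c => passCell grid thread st c.1 c.2) (S, c0)).1 = S ∧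
      ∀ c ∈ cells, ¬ ((c.1, c.2) ∉ S ∧ gget grid c.1 c.2 ≤ thread ∧
        ((c.1 - 1, c.2) ∈ S ∨ (c.1 + 1, c.2) ∈ S ∨ (c.1, c.2 - 1) ∈ S ∨ (c.1, c.2 + 1) ∈ S))) := by
  induction cells with
  | nil =>
    intro S c0 hnd hsound hrange
    exact ⟨fun p hp => hp, hnd, hsound, hrange, le_refl _, fun h => Or.inl (by
      simpa using h), fun h => h, fun _ => ⟨rfl, by simp⟩⟩
  | cons c cells' ih =>
    intro S c0 hnd hsound hrange
    have hinc : InR (grid.length : Int) c := hin c (by simp)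
    have hin' : ∀ x ∈ cells', InR (grid.length : Int) x := fun x hx => hin x (by simp [hx])
    simp only [List.foldl_cons]
    by_cases hcond : (c.1, c.2) ∉ S ∧ gget grid c.1 c.2 ≤ thread ∧
        ((c.1 - 1, c.2) ∈ S ∨ (c.1 + 1, c.2) ∈ S ∨ (c.1, c.2 - 1) ∈ S ∨ (c.1, c.2 + 1) ∈ S)
    · have hstep : passCell grid thread (S, c0) c.1 c.2 = (PySem.Set.add S (c.1, c.2), true) := by
        simp only [passCell]
        rw [if_pos hcond]
      rw [hstep]
      obtain ⟨hc1, hc2, hc3⟩ := hcond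
      have hadd : PySem.Set.add S (c.1, c.2) = S ++ [(c.1, c.2)] :=
        PySem.Set.add_of_not_mem hc1
      have hnd1 : (PySem.Set.add S (c.1, c.2)).Nodup := PySem.Set.nodup_add _ _ hnd
      have hreachc : Reach grid thread c := by
        have hgood : Good grid thread c := ⟨hinc, hc2⟩
        rcases hc3 with hm | hm | hm | hm
        · refine Reach.step (hsound _ hm) ?_ hgood
          left
          show c = (c.1 - 1 + 1, c.2)
          rw [show c.1 - 1 + 1 = c.1 by omega]
        · refine Reach.step (hsound _ hm) ?_ hgood
          right; left
          show c = (c.1 + 1 - 1, c.2)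
          rw [show c.1 + 1 - 1 = c.1 by omega]
        · refine Reach.step (hsound _ hm) ?_ hgood
          right; right; left
          show c = (c.1, c.2 - 1 + 1)
          rw [show c.2 - 1 + 1 = c.2 by omega]
        · refine Reach.step (hsound _ hm) ?_ hgood
          right; right; right
          show c = (c.1, c.2 + 1 - 1)
          rw [show c.2 + 1 - 1 = c.2 by omega]
      have hsound1 : ∀ p ∈ PySem.Set.add S (c.1, c.2), Reach grid thread p := by
        intro p hp
        rw [PySem.Set.mem_add] at hp
        rcases hp with hp | hp
        · exact hsound p hp
        · subst hp; exact hreachc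
      have hrange1 : ∀ p ∈ PySem.Set.add S (c.1, c.2), InR (grid.length : Int) p := by
        intro p hp
        rw [PySem.Set.mem_add] at hp
        rcases hp with hp | hp
        · exact hrange p hp
        · subst hp; exact hinc
      have hlen1 : S.length < (PySem.Set.add S (c.1, c.2)).length := by
        rw [hadd]; simp
      obtain ⟨g1, g2, g3, g4, g5, g6, g7, g8⟩ :=
        ih hin' (PySem.Set.add S (c.1, c.2)) true hnd1 hsound1 hrange1
      refine ⟨?_, g2, g3, g4, by omega, ?_, ?_, ?_⟩
      · intro p hp
        exact g1 p (by rw [PySem.Set.mem_add]; exact Or.inl hp)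
      · intro _
        right
        omega
      · intro _
        exact g7 rfl
      · intro h
        exact absurd (g7 rfl) (by simp [h])
    · have hstep : passCell grid thread (S, c0) c.1 c.2 = (S, c0) := by
        simp only [passCell]
        rw [if_neg hcond]
      rw [hstep]
      obtain ⟨g1, g2, g3, g4, g5, g6, g7, g8⟩ := ih hin' S c0 hnd hsound hrange
      refine ⟨g1, g2, g3, g4, g5, g6, g7, ?_⟩
      · intro h
        obtain ⟨he, hall⟩ := g8 h
        refine ⟨he, ?_⟩
        intro d hd
        rcases List.mem_cons.mp hd with hdc | hdc
        · subst hdc; exact hcond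
        · exact hall d hdc

-- bPass is the passCell fold over the list of all in-range cells
def allCells (n : Int) : List (Int × Int) :=
  ((PySem.List.pyRange 0 n 1).map
    (fun i => (PySem.List.pyRange 0 n 1).map (fun j => (i, j)))).flatten

lemma bPass_eq_fold (grid : List (List Int)) (thread n : Int)
    (st : PySem.Set (Int × Int) × Bool) :
    bPass grid thread n st =
      (allCells n).foldl (fun st c => passCell grid thread st c.1 c.2) st := by
  simp only [bPass, allCells, List.foldl_flatten, List.foldl_map]

lemma mem_allCells (n : Int) (c : Int × Int) : c ∈ allCells n ↔ InR n c := by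
  simp only [allCells, List.mem_flatten, List.mem_map, PySem.List.mem_pyRange_one, InR]
  constructor
  · rintro ⟨l, ⟨i, hi, rfl⟩, hc⟩
    obtain ⟨j, hj, rfl⟩ := List.mem_map.mp hc
    obtain ⟨hj1, hj2⟩ := PySem.List.mem_pyRange_one.mp hj
    exact ⟨hi.1, hi.2, hj1, hj2⟩
  · rintro ⟨h1, h2, h3, h4⟩
    refine ⟨(PySem.List.pyRange 0 n 1).map (fun j => (c.1, j)), ⟨c.1, ⟨h1, h2⟩, rfl⟩, ?_⟩
    rw [List.mem_map]
    exact ⟨c.2, PySem.List.mem_pyRange_one.mpr ⟨h3, h4⟩, rfl⟩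

lemma card_bound (n : Nat) (S : List (Int × Int)) (hnd : S.Nodup)
    (hin : ∀ p ∈ S, InR (n : Int) p) : S.length ≤ n * n := by
  have hsub : S.toFinset ⊆ (Finset.Ico (0 : Int) n) ×ˢ (Finset.Ico (0 : Int) n) := by
    intro p hp
    obtain ⟨h1, h2, h3, h4⟩ := hin p (List.mem_toFinset.mp hp)
    simp only [Finset.mem_product, Finset.mem_Ico]
    exact ⟨⟨h1, h2⟩, ⟨h3, h4⟩⟩
  have hcard := Finset.card_le_card hsub
  rw [List.toFinset_card_of_nodup hnd, Finset.card_product, Int.card_Ico] at hcard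
  simpa using hcard

lemma bLoop_correct (grid : List (List Int)) (thread : Int) :
    ∀ (fuel : Nat) (S : PySem.Set (Int × Int)),
    S.Nodup → (∀ p ∈ S, Reach grid thread p) → (∀ p ∈ S, InR (grid.length : Int) p) →
    grid.length * grid.length + 1 ≤ fuel + S.length →
    (∀ p ∈ S, p ∈ bLoop grid thread (grid.length : Int) fuel S) ∧
    (∀ p ∈ bLoop grid thread (grid.length : Int) fuel S, Reach grid thread p) ∧
    (∀ m ∈ bLoop grid thread (grid.length : Int) fuel S,
      ∀ p : Int × Int, Adj m p → Good grid thread p →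
        p ∈ bLoop grid thread (grid.length : Int) fuel S) := by
  intro fuel
  induction fuel with
  | zero =>
    intro S hnd hsound hrange hbudget
    exfalso
    have := card_bound grid.length S hnd hrange
    omega
  | succ fuel ih =>
    intro S hnd hsound hrange hbudget
    have hcells : ∀ c ∈ allCells (grid.length : Int), InR (grid.length : Int) c :=
      fun c hc => (mem_allCells _ c).mp hc
    have hfold := foldB grid thread (allCells (grid.length : Int)) hcells S false hnd hsound hrange
    rw [← bPass_eq_fold grid thread (grid.length : Int) (S, false)] at hfold
    obtain ⟨g1, g2, g3, g4, g5, g6, g7, g8⟩ := hfold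
    cases hflag : (bPass grid thread (grid.length : Int) (S, false)).2 with
    | true =>
      have hres : bLoop grid thread (grid.length : Int) (fuel + 1) S =
          bLoop grid thread (grid.length : Int) fuel
            (bPass grid thread (grid.length : Int) (S, false)).1 := by
        simp only [bLoop]
        rw [hflag]
        simp
      rw [hres]
      have hlt : S.length < (bPass grid thread (grid.length : Int) (S, false)).1.length := by
        rcases g6 hflag with h | h
        · simp at h
        · exact h
      obtain ⟨r1, r2, r3⟩ := ih (bPass grid thread (grid.length : Int) (S, false)).1
        g2 g3 g4 (by omega)
      exact ⟨fun p hp => r1 p (g1 p hp), r2, r3⟩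
    | false =>
      obtain ⟨heq, hall⟩ := g8 hflag
      have hres : bLoop grid thread (grid.length : Int) (fuel + 1) S = S := by
        simp only [bLoop]
        rw [hflag]
        simp [heq]
      rw [hres]
      refine ⟨fun p hp => hp, hsound, ?_⟩
      intro m hm p hadj hgood
      have hpc : p ∈ allCells (grid.length : Int) := (mem_allCells _ p).mpr hgood.1
      have hnc := hall p hpc
      by_contra hps
      apply hnc
      refine ⟨hps, hgood.2, ?_⟩
      rcases adj_mem_cases hadj with hmc | hmc | hmc | hmc
      · left; rw [← hmc]; exact hm
      · right; left; rw [← hmc]; exact hm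
      · right; right; left; rw [← hmc]; exact hm
      · right; right; right; rw [← hmc]; exact hm

-- ===== VERDICT (by name: the statement is the Claim_ definition above) =====
theorem check_spec : Claim_equal_check := by
  intro grid thread _ hpre
  unfold Spec_check
  obtain ⟨hne, -, -⟩ := hpre
  have hn1 : 1 ≤ grid.length := by
    cases grid with
    | nil => exact absurd rfl hne
    | cons a t => simp
  simp only [check, check_alt]
  by_cases hg : gget grid 0 0 > thread
  · rw [if_pos hg, if_pos hg]
  · rw [if_neg hg, if_neg hg]
    -- ---------- A side ----------
    set v0 := (PySem.List.pyRange 0 (grid.length : Int) 1).map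
      (fun _ => List.replicate grid.length (0 : Int)) with hv0
    have hlenv0 : v0.length = grid.length := by
      simp [hv0, PySem.List.length_pyRange_one]
    have hrows0 : ∀ r ∈ v0, r.length = grid.length := by
      intro r hr
      obtain ⟨a, _, heq⟩ := List.mem_map.mp hr
      rw [← heq]
      simp
    have hsh0 : ShapeN grid.length v0 := ⟨hlenv0, hrows0⟩
    have hmg0 : ∀ i j : Nat, mget v0 i j = 0 := by
      intro i j
      simp only [mget]
      by_cases hi : i < v0.length
      · obtain ⟨a, _, heq⟩ := List.mem_map.mp (getD_mem v0 i [] hi)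
        rw [← heq]
        by_cases hj : j < grid.length
        · rw [getD_eq_get _ _ _ (by simpa using hj)]
          simp
        · rw [getD_out _ _ _ (by simpa using hj)]
      · rw [getD_out _ _ _ hi]
        simp
    have hbin0 : BinV v0 := by
      intro r hr x hx
      obtain ⟨a, _, heq⟩ := List.mem_map.mp hr
      rw [← heq] at hx
      exact Or.inl (List.eq_of_mem_replicate hx)
    have hvn : vset v0 0 0 1 = mset v0 0 0 1 := by
      have := vset_nat v0 0 0 1 (by omega) (by omega)
      simpa using this
    have hiv : (0 : Nat) < v0.length := by omega
    have hrlen : (v0.getD 0 []).length = grid.length := hrows0 _ (getD_mem _ _ _ hiv)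
    have hjv : (0 : Nat) < (v0.getD 0 []).length := by omega
    have hsh1 : ShapeN grid.length (vset v0 0 0 1) := by
      rw [hvn]; exact shapeN_mset hsh0 hiv _ 1
    have hbin1 : BinV (vset v0 0 0 1) := by
      rw [hvn]; exact binV_mset hbin0 _ _
    have hgood00 : Good grid thread ((0 : Int), (0 : Int)) := by
      have hlt : (0 : Int) < (grid.length : Int) := by exact_mod_cast hn1
      exact ⟨⟨le_refl _, hlt, le_refl _, hlt⟩, show gget grid 0 0 ≤ thread by omega⟩
    have hmarked1 : MarkedA (vset v0 0 0 1) (0, 0) := by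
      simp only [MarkedA]
      rw [vget_nat _ _ _ (by omega) (by omega), hvn]
      simpa using mget_mset_self hiv hjv 1
    have hmark1iff : ∀ p : Int × Int, 0 ≤ p.1 → 0 ≤ p.2 →
        MarkedA (vset v0 0 0 1) p → p = (0, 0) := by
      intro p hp1 hp2 hm
      by_contra hpc
      simp only [MarkedA] at hm
      rw [vget_nat _ _ _ hp1 hp2, hvn] at hm
      rw [mget_mset_ne _ _ _ _ _ (by
        rintro ⟨e1, e2⟩
        exact hpc (Prod.ext (by omega) (by omega)))] at hm
      rw [hmg0] at hm
      exact absurd hm (by omega)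
    have hz0 : zeros v0 = grid.length * grid.length := by
      simp only [zeros, hv0, List.map_map]
      rw [show ((fun r => List.count 0 r) ∘ fun _ => List.replicate grid.length (0 : Int)) =
        (fun _ : Int => grid.length) by
          funext a
          simp]
      rw [List.map_const']
      simp [PySem.List.length_pyRange_one, List.sum_replicate]
    have hz1 : zeros (vset v0 0 0 1) + 1 = grid.length * grid.length := by
      rw [hvn, ← hz0]
      exact zeros_mset hiv hjv (hmg0 0 0)
    have hinv : InvA grid thread (grid.length * grid.length + 1) (vset v0 0 0 1) [(0, 0)] := by
      refine ⟨hsh1, hbin1, ?_, ?_, ?_, ?_⟩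
      · intro p hp1 hp2 hm
        have := hmark1iff p hp1 hp2 hm
        subst this
        exact Reach.seed hgood00
      · intro p hp
        simp only [List.mem_singleton] at hp
        subst hp
        exact ⟨hgood00, hmarked1⟩
      · intro p hp1 hp2 hm hnq
        exact absurd (by simp [hmark1iff p hp1 hp2 hm]) hnq
      · simp only [List.length_singleton]
        omega
    obtain ⟨a1, a2, a3⟩ := bfsLoop_correct grid thread (grid.length * grid.length + 1)
      (vset v0 0 0 1) [(0, 0)] hinv
    set final := bfsLoop grid thread (grid.length : Int) (grid.length * grid.length + 1)
      (vset v0 0 0 1) [(0, 0)] with hfinal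
    have hAchar : ∀ p : Int × Int, 0 ≤ p.1 → 0 ≤ p.2 →
        (MarkedA final p ↔ Reach grid thread p) := by
      intro p hp1 hp2
      constructor
      · exact a2 p hp1 hp2
      · refine reach_of_closed (MarkedA final) (a1 (0, 0) (by omega) (by omega) hmarked1) ?_ p
        intro p' hg' hm' q' hadj hgood
        exact a3 p' hg'.1.1 hg'.1.2.2.1 hm' q' hadj hgood
    -- ---------- B side ----------
    have hS0 : PySem.Set.ofList [((0 : Int), (0 : Int))] = [((0 : Int), (0 : Int))] := rfl
    have hseedS : ((0 : Int), (0 : Int)) ∈ PySem.Set.ofList [((0 : Int), (0 : Int))] := by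
      rw [hS0]; simp
    obtain ⟨b1, b2, b3⟩ := bLoop_correct grid thread (grid.length * grid.length + 1)
      (PySem.Set.ofList [((0 : Int), (0 : Int))])
      (by rw [hS0]; simp)
      (by
        rw [hS0]
        intro p hp
        simp only [List.mem_singleton] at hp
        subst hp
        exact Reach.seed hgood00)
      (by
        rw [hS0]
        intro p hp
        simp only [List.mem_singleton] at hp
        subst hp
        exact hgood00.1)
      (by rw [hS0]; simp only [List.length_singleton]; omega)
    set finalB := bLoop grid thread (grid.length : Int) (grid.length * grid.length + 1)
      (PySem.Set.ofList [((0 : Int), (0 : Int))]) with hfinalB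
    have hBchar : ∀ p : Int × Int, (p ∈ finalB ↔ Reach grid thread p) := by
      intro p
      constructor
      · exact b2 p
      · refine reach_of_closed (· ∈ finalB) (b1 (0, 0) hseedS) ?_ p
        intro p' _ hm' q' hadj hgood
        exact b3 p' hm' q' hadj hgood
    -- ---------- combine ----------
    have hd1 : (0 : Int) ≤ (grid.length : Int) - 1 := by
      have : (1 : Int) ≤ (grid.length : Int) := by exact_mod_cast hn1
      omega
    rw [Bool.eq_iff_iff]
    rw [beq_iff_eq]
    rw [PySem.Set.contains_iff]
    have hA := hAchar ((grid.length : Int) - 1, (grid.length : Int) - 1) hd1 hd1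
    have hB := hBchar ((grid.length : Int) - 1, (grid.length : Int) - 1)
    simp only [MarkedA] at hA
    rw [hA, hB]
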